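-- pv_equiv track=rewrite | github.com/duartejr/revisao_agents | src/revisao_agents/utils/helpers.py | fmt_chunks
-- ===== SOURCE A (Python) =====
-- from typing import List, Optional
--
-- def fmt_chunks(chunks: List[str], max_chars: int = 1200) -> str:
--     bloco = ""
--     for i, c in enumerate(chunks, 1):
--         linha = f"[{i}] {c}\n"
--         if len(bloco) + len(linha) > max_chars:
--             break
--         bloco += linha
--     return bloco.strip()
-- ===== SOURCE B (Python) =====
-- def fmt_chunks(chunks, max_chars=1200):
--     lines = [f"[{i}] {c}\n" for i, c in enumerate(chunks, 1)]
--     totals = []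
--     run = 0
--     for l in lines:
--         run += len(l)
--         totals.append(run)
--     k = next((i for i, t in enumerate(totals) if t > max_chars), len(lines))
--     return "".join(lines[:k]).strip()
-- ===== Notes on version B (the rewrite author's own statement) =====
-- stated objective: alternative
-- what changed: Replaces the single early-breaking accumulation loop by a build-all-lines pass, an explicit prefix-sum list, a first-overflow cutoff index, and one join of the kept prefix.
import Mathlib
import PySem

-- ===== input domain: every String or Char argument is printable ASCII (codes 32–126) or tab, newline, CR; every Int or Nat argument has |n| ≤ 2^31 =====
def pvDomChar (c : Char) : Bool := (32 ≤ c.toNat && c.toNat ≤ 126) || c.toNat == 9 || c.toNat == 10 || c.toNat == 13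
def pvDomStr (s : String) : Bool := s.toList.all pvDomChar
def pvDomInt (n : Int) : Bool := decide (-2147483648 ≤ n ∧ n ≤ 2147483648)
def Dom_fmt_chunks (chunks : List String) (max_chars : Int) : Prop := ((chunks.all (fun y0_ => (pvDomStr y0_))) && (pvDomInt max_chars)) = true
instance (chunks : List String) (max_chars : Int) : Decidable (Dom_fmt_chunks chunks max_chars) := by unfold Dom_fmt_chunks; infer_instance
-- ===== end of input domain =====

-- B replaces A's early-breaking accumulation loop by build-all-lines / prefix sums / cutoff index / one join (alternative decomposition, same results).

-- ===== PORT A =====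
-- the f-string "[{i}] {c}\n", on code points
def pvLine (i : Int) (c : String) : List Char :=
  '[' :: PySem.Int.toChars i ++ ']' :: ' ' :: c.toList ++ ['\n']

-- A's loop: accumulate lines into bloco, break at the first overflow
def pvLoopA (max_chars : Int) : List Char → List (Int × String) → List Char
  | bloco, [] => bloco
  | bloco, (i, c) :: rest =>
      let linha := pvLine i c
      if PySem.Chars.len bloco + PySem.Chars.len linha > max_chars then bloco
      else pvLoopA max_chars (bloco ++ linha) rest

def fmt_chunks (chunks : List String) (max_chars : Int) : String :=
  String.ofList (PySem.Chars.strip (pvLoopA max_chars [] (PySem.List.enumerate chunks 1)))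

-- ===== PORT B =====
-- running prefix sums of the line lengths (the totals list of Source B)
def pvAccum (run : Int) : List Int → List Int
  | [] => []
  | x :: xs => (run + x) :: pvAccum (run + x) xs

-- first index whose total exceeds max_chars; the list length if none does
def pvCut (max_chars : Int) : List Int → Nat
  | [] => 0
  | t :: ts => if t > max_chars then 0 else pvCut max_chars ts + 1

def fmt_chunks_alt (chunks : List String) (max_chars : Int) : String :=
  let lines := (PySem.List.enumerate chunks 1).map (fun p => pvLine p.1 p.2)
  let totals := pvAccum 0 (lines.map PySem.Chars.len)
  let k := pvCut max_chars totals
  String.ofList (PySem.Chars.strip (PySem.Chars.join [] (lines.take k)))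

-- ===== PRECONDITION & SPEC =====
def Spec_fmt_chunks (chunks : List String) (max_chars : Int) (out : String) : Prop := out = fmt_chunks_alt chunks max_chars
instance (chunks : List String) (max_chars : Int) (out : String) : Decidable (Spec_fmt_chunks chunks max_chars out) := by unfold Spec_fmt_chunks; infer_instance

-- ===== CLAIM (what is proved, stated in full; the proofs are below) =====
def Claim_equal_fmt_chunks : Prop := ∀ (chunks : List String) (max_chars : Int), Dom_fmt_chunks chunks max_chars → Spec_fmt_chunks chunks max_chars (fmt_chunks chunks max_chars)

-- ===== LEMMAS AND PROOFS =====
lemma pvJoin_nil_eq_flatten (ls : List (List Char)) : PySem.Chars.join [] ls = ls.flatten := by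
  induction ls with
  | nil => rfl
  | cons l ls ih =>
      cases ls with
      | nil => simp [PySem.Chars.join, List.intercalate]
      | cons m ms =>
          simp only [PySem.Chars.join, List.intercalate, List.intersperse] at *
          simp_all

lemma pvLoopA_eq (max_chars : Int) (ps : List (Int × String)) (acc : List Char) :
    pvLoopA max_chars acc ps =
      acc ++ ((ps.map (fun p => pvLine p.1 p.2)).take
        (pvCut max_chars (pvAccum (acc.length : Int) ((ps.map (fun p => pvLine p.1 p.2)).map PySem.Chars.len)))).flatten := by
  induction ps generalizing acc with
  | nil => simp [pvLoopA, pvAccum, pvCut]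
  | cons p ps ih =>
      obtain ⟨i, c⟩ := p
      simp only [pvLoopA, List.map_cons, pvAccum, pvCut, PySem.Chars.len_eq]
      split_ifs with h
      · simp
      · rw [ih]
        simp only [List.take_succ_cons, List.flatten_cons, List.append_assoc,
          List.length_append, List.map_map]
        push_cast
        rfl

-- ===== VERDICT (by name: the statement is the Claim_ definition above) =====
theorem fmt_chunks_spec : Claim_equal_fmt_chunks := by
  intro chunks max_chars _
  show _ = _
  unfold fmt_chunks fmt_chunks_alt
  simp only [pvJoin_nil_eq_flatten, pvLoopA_eq]
  simp
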